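-- pv_equiv track=rewrite | github.com/bordasa/LS_py110_lesson1 | py119_interview_practice/problem3.py | char2_upper
-- ===== SOURCE A (Python) =====
-- def char2_upper(word):
--     if len(word) < 2:
--         return word
--
--     new_word_list = []
--
--     for index, letter in enumerate(word, 1):
--         if index % 2 == 0:
--             letter = letter.upper()
--         new_word_list.append(letter)
--
--     return ''.join(new_word_list)
-- ===== SOURCE B (Python) =====
-- def char2_upper(word):
--     chars = list(word)
--     out = []
--     i = 0
--     while i + 1 < len(chars):
--         out.append(chars[i])
--         out.append(chars[i + 1].upper())
--         i += 2
--     out.extend(chars[i:])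
--     return ''.join(out)
-- ===== Notes on version B (the rewrite author's own statement) =====
-- stated objective: alternative
-- what changed: Replaces the enumerate-with-parity-test loop by a stride-2 pairwise walk: each step copies one character and uppercases the next, so no index parity is ever computed.
import Mathlib
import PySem

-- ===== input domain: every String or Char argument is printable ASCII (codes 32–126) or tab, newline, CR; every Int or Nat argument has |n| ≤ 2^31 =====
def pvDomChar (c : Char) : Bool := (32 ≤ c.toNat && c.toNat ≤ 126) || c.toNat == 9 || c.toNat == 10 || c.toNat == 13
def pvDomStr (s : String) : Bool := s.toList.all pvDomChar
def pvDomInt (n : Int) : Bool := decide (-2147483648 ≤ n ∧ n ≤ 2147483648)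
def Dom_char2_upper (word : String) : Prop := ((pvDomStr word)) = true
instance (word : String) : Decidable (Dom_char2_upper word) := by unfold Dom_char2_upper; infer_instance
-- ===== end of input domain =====

-- B uppercases every second character by a stride-2 pairwise walk instead of A's enumerate loop with a parity test; same O(n) cost, alternative decomposition.

-- ===== PORT A =====
def char2_upper (word : String) : String :=
  if word.toList.length < 2 then word
  else
    let newWordList :=
      (PySem.List.enumerate word.toList 1).foldl
        (fun acc p =>
          let letter := if PySem.Int.mod p.1 2 == 0 then PySem.Chars.upperChar p.2 else p.2
          acc ++ [letter]) []
    String.ofList newWordList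

-- ===== PORT B =====
-- the index loop 'while i+1 < len(chars): … i += 2' advances two characters per
-- iteration from 0, so it is ported as structural recursion consuming two chars;
-- the final 'out.extend(chars[i:])' is the leftover tail returned by the base case
def char2_upper_altGo : List Char → List Char
  | a :: b :: t => a :: PySem.Chars.upperChar b :: char2_upper_altGo t
  | rest => rest

def char2_upper_alt (word : String) : String :=
  String.ofList (char2_upper_altGo word.toList)

-- ===== PRECONDITION & SPEC =====
def Spec_char2_upper (word : String) (out : String) : Prop := out = char2_upper_alt word
instance (word : String) (out : String) : Decidable (Spec_char2_upper word out) := by unfold Spec_char2_upper; infer_instance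

-- ===== CLAIM (what is proved, stated in full; the proofs are below) =====
def Claim_equal_char2_upper : Prop := ∀ (word : String), Dom_char2_upper word → Spec_char2_upper word (char2_upper word)

-- ===== LEMMAS AND PROOFS =====

theorem foldl_append_map_c2u {α β : Type} (g : α → β) :
    ∀ (l : List α) (init : List β),
      l.foldl (fun acc p => acc ++ [g p]) init = init ++ l.map g := by
  intro l
  induction l with
  | nil => simp
  | cons x xs ih => intro init; simp [ih]

theorem altGo_eq_map_enumerate_c2u :
    ∀ (l : List Char) (s : Int), s % 2 = 1 →
      (PySem.List.enumerate l s).map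
        (fun p => if PySem.Int.mod p.1 2 == 0 then PySem.Chars.upperChar p.2 else p.2)
      = char2_upper_altGo l := by
  intro l
  induction l using char2_upper_altGo.induct with
  | case1 a b t ih =>
    intro s hs
    have h1 : ¬ (2 ∣ s) := by omega
    have h2 : 2 ∣ (s + 1) := by omega
    simp [PySem.List.enumerate_cons, char2_upper_altGo, h1, h2]
    simpa using ih (s + 1 + 1) (by omega)
  | case2 rest hrest =>
    intro s hs
    match rest, hrest with
    | [], _ => simp [char2_upper_altGo]
    | [c], _ =>
      have h1 : ¬ (2 ∣ s) := by omega
      simp [PySem.List.enumerate_cons, char2_upper_altGo, h1]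
    | a :: b :: t, hr => exact (hr a b t rfl).elim

-- ===== VERDICT (by name: the statement is the Claim_ definition above) =====
theorem char2_upper_spec : Claim_equal_char2_upper := by
  intro word _
  unfold Spec_char2_upper char2_upper char2_upper_alt
  by_cases h : word.toList.length < 2
  · rw [if_pos h]
    have hgo : char2_upper_altGo word.toList = word.toList := by
      match word.toList, h with
      | [], _ => rfl
      | [c], _ => rfl
    simp [hgo]
  · simp only [h, if_neg, not_false_iff]
    rw [foldl_append_map_c2u, altGo_eq_map_enumerate_c2u word.toList 1 (by decide)]
    simp
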